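-- pv_equiv track=rewrite | github.com/dishu2511/changeguard-mcp | full_lambda.py | _actions_from_blockers
-- ===== SOURCE A (Python) =====
-- from typing import Optional, List, Dict, Any, Literal, Tuple
--
-- def _actions_from_blockers(blockers: List[str]) -> List[str]:
--     actions: List[str] = []
--     for b in blockers:
--         bl = b.lower()
--         if "success criteria" in bl or "metrics" in bl:
--             actions.append("Define success criteria/metrics and how they will be measured (before/after).")
--         elif "rollback" in bl:
--             actions.append("Write rollback/backout steps and estimate rollback time; confirm feasibility.")
--         elif "test/validation" in bl:
--             actions.append("Document validation steps (pre/post) and assign a validation owner.")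
--         elif "operational ownership" in bl:
--             actions.append("Confirm ownership/on-call and update runbooks, dashboards, and alerts.")
--         elif "blast radius" in bl:
--             actions.append("Document blast radius and customer impact; define comms plan if needed.")
--         elif "approvals" in bl:
--             actions.append("Confirm approvals needed and lead time; schedule the change window accordingly.")
--     return actions
-- ===== SOURCE B (Python) =====
-- from typing import List, Optional, Tuple
--
-- _RULES: List[Tuple[Tuple[str, ...], str]] = [
--     (("success criteria", "metrics"),
--      "Define success criteria/metrics and how they will be measured (before/after)."),
--     (("rollback",),
--      "Write rollback/backout steps and estimate rollback time; confirm feasibility."),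
--     (("test/validation",),
--      "Document validation steps (pre/post) and assign a validation owner."),
--     (("operational ownership",),
--      "Confirm ownership/on-call and update runbooks, dashboards, and alerts."),
--     (("blast radius",),
--      "Document blast radius and customer impact; define comms plan if needed."),
--     (("approvals",),
--      "Confirm approvals needed and lead time; schedule the change window accordingly."),
-- ]
--
-- def _actions_from_blockers(blockers: List[str]) -> List[str]:
--     # Transposed traversal: one staged pass over all blockers PER RULE,
--     # claiming each still-unassigned blocker whose text contains a keyword.
--     lows = [b.lower() for b in blockers]
--     assigned: List[Optional[str]] = [None] * len(lows)
--     for kws, act in _RULES: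
--         for i, bl in enumerate(lows):
--             if assigned[i] is None and any(k in bl for k in kws):
--                 assigned[i] = act
--     return [a for a in assigned if a is not None]
-- ===== Notes on version B (the rewrite author's own statement) =====
-- stated objective: alternative
-- what changed: Transposes the loop nesting: instead of an elif chain deciding each blocker's action in one pass, B makes one staged pass over all blockers per rule (rules as the outer loop), claiming each still-unassigned blocker into an assigned array, then compacts the array; priority comes from the outer rule order plus assign-once, not from per-blocker first-match.
import Mathlib
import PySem

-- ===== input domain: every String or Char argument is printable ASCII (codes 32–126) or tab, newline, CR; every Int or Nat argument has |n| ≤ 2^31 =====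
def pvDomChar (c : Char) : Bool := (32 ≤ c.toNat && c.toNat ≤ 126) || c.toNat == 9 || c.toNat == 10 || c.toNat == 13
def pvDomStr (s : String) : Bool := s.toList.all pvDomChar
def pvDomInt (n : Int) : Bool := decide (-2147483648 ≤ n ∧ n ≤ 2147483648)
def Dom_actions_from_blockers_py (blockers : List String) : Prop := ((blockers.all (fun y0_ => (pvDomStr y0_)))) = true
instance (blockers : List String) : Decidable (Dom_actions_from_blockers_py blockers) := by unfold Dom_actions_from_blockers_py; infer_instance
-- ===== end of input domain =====

-- B transposes the traversal: one staged pass over all blockers per rule with an assign-once array, instead of A's per-blocker elif chain (alternative, same cost).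


-- ===== PORT A =====
-- loop body of A's for-loop: the elif chain appending to the accumulator
def pvStepA (actions : List String) (b : String) : List String :=
  let bl := PySem.Str.lower b
  if PySem.Str.isIn "success criteria" bl || PySem.Str.isIn "metrics" bl then
    actions ++ ["Define success criteria/metrics and how they will be measured (before/after)."]
  else if PySem.Str.isIn "rollback" bl then
    actions ++ ["Write rollback/backout steps and estimate rollback time; confirm feasibility."]
  else if PySem.Str.isIn "test/validation" bl then
    actions ++ ["Document validation steps (pre/post) and assign a validation owner."]
  else if PySem.Str.isIn "operational ownership" bl then
    actions ++ ["Confirm ownership/on-call and update runbooks, dashboards, and alerts."]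
  else if PySem.Str.isIn "blast radius" bl then
    actions ++ ["Document blast radius and customer impact; define comms plan if needed."]
  else if PySem.Str.isIn "approvals" bl then
    actions ++ ["Confirm approvals needed and lead time; schedule the change window accordingly."]
  else actions

def actions_from_blockers_py (blockers : List String) : List String :=
  blockers.foldl pvStepA []

-- ===== PORT B =====
-- Source B's ordered rule table
def pvRules : List (List String × String) :=
  [ (["success criteria", "metrics"],
     "Define success criteria/metrics and how they will be measured (before/after)."),
    (["rollback"],
     "Write rollback/backout steps and estimate rollback time; confirm feasibility."),
    (["test/validation"],
     "Document validation steps (pre/post) and assign a validation owner."),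
    (["operational ownership"],
     "Confirm ownership/on-call and update runbooks, dashboards, and alerts."),
    (["blast radius"],
     "Document blast radius and customer impact; define comms plan if needed."),
    (["approvals"],
     "Confirm approvals needed and lead time; schedule the change window accordingly.") ]

-- Source B's inner pass for one rule: claim each still-unassigned blocker that matches
-- (index-wise assignment over `assigned`, transcribed as a zipWith over assigned/lows)
def pvClaimPass (r : List String × String) (assigned : List (Option String)) (lows : List String) :
    List (Option String) :=
  List.zipWith
    (fun a bl => if a.isNone && r.1.any (fun k => PySem.Str.isIn k bl) then some r.2 else a)
    assigned lows

def actions_from_blockers_py_alt (blockers : List String) : List String :=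
  let lows := blockers.map PySem.Str.lower
  let assigned := pvRules.foldl (fun asg r => pvClaimPass r asg lows) (lows.map (fun _ => none))
  assigned.filterMap id

-- ===== PRECONDITION & SPEC =====
def Spec_actions_from_blockers_py (blockers : List String) (out : List String) : Prop := out = actions_from_blockers_py_alt blockers
instance (blockers : List String) (out : List String) : Decidable (Spec_actions_from_blockers_py blockers out) := by unfold Spec_actions_from_blockers_py; infer_instance

-- ===== CLAIM (what is proved, stated in full; the proofs are below) =====
def Claim_equal_actions_from_blockers_py : Prop := ∀ (blockers : List String), Dom_actions_from_blockers_py blockers → Spec_actions_from_blockers_py blockers (actions_from_blockers_py blockers)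

-- ===== LEMMAS AND PROOFS =====

-- per-element step of the rule fold, seen pointwise
def pvStepOpt (bl : String) (a : Option String) (r : List String × String) : Option String :=
  if a.isNone && r.1.any (fun k => PySem.Str.isIn k bl) then some r.2 else a

-- one claim pass on a mapped array acts pointwise
theorem pv_claimPass_map (r : List String × String) (f : String → Option String)
    (lows : List String) :
    pvClaimPass r (lows.map f) lows = lows.map (fun bl => pvStepOpt bl (f bl) r) := by
  induction lows with
  | nil => rfl
  | cons b t ih => simp [pvClaimPass, pvStepOpt] at *; exact ih

-- the outer fold over rules acts pointwise on the assigned array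
theorem pv_fold_map (rules : List (List String × String)) (f : String → Option String)
    (lows : List String) :
    rules.foldl (fun asg r => pvClaimPass r asg lows) (lows.map f)
      = lows.map (fun bl => rules.foldl (pvStepOpt bl) (f bl)) := by
  induction rules generalizing f with
  | nil => rfl
  | cons r rs ih =>
    rw [List.foldl_cons, pv_claimPass_map, ih (fun bl => pvStepOpt bl (f bl) r)]
    rfl

-- the pointwise rule fold keeps an already-set value
theorem pv_fold_some (rules : List (List String × String)) (bl x : String) :
    rules.foldl (pvStepOpt bl) (some x) = some x := by
  induction rules with
  | nil => rfl
  | cons r rs ih => simpa [pvStepOpt] using ih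

-- starting from none, the pointwise rule fold is a first-match lookup
theorem pv_fold_none (rules : List (List String × String)) (bl : String) :
    rules.foldl (pvStepOpt bl) none
      = (rules.find? (fun r => r.1.any (fun k => PySem.Str.isIn k bl))).map Prod.snd := by
  induction rules with
  | nil => rfl
  | cons r rs ih =>
    rw [List.foldl_cons]
    by_cases h : (r.1.any fun k => PySem.Str.isIn k bl) = true
    · simp only [List.find?, h, pvStepOpt, Option.isNone_none, Bool.true_and, if_true,
        Option.map_some]
      exact pv_fold_some rs bl r.2
    · have hf : (r.1.any fun k => PySem.Str.isIn k bl) = false := by simpa using h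
      simp only [List.find?, hf, pvStepOpt, Option.isNone_none, Bool.true_and, if_false,
        Bool.false_eq_true]
      exact ih

-- per blocker: A's elif chain appends exactly what the pointwise rule fold yields from none
theorem pv_step_eq (acc : List String) (b : String) :
    pvStepA acc b
      = acc ++ (pvRules.foldl (pvStepOpt (PySem.Str.lower b)) none).toList := by
  rw [pv_fold_none]
  unfold pvStepA pvRules
  simp only [List.find?, List.any_cons, List.any_nil, Bool.or_false]
  split_ifs with h1 h2 h3 h4 h5 h6 <;> simp_all;
    rcases h1 with h | h <;> simp_all

-- filterMap id over a mapped option list is a flatMap of toList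
theorem pv_filterMap_id_map {A B : Type} (g : A → Option B) (l : List A) :
    (l.map g).filterMap id = l.flatMap (fun x => (g x).toList) := by
  induction l with
  | nil => rfl
  | cons b t ih =>
    cases hgb : g b with
    | none =>
      simp only [List.map_cons, List.filterMap_cons, List.flatMap_cons, hgb, id,
        Option.toList, List.nil_append]
      exact ih
    | some v =>
      simp only [List.map_cons, List.filterMap_cons, List.flatMap_cons, hgb, id,
        Option.toList, List.singleton_append]
      exact congrArg _ ih

-- B's result via the pointwise picture, as a flatMap
set_option maxHeartbeats 1000000 in
theorem pv_alt_flatMap (l : List String) :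
    actions_from_blockers_py_alt l
      = l.flatMap (fun b => (pvRules.foldl (pvStepOpt (PySem.Str.lower b)) none).toList) := by
  show List.filterMap id
      (pvRules.foldl (fun asg r => pvClaimPass r asg (l.map PySem.Str.lower))
        ((l.map PySem.Str.lower).map (fun _ => none))) = _
  rw [pv_fold_map, List.map_map]
  exact pv_filterMap_id_map _ l

-- A's accumulating fold equals acc ++ B's result
theorem pv_main (l : List String) (acc : List String) :
    l.foldl pvStepA acc = acc ++ actions_from_blockers_py_alt l := by
  induction l generalizing acc with
  | nil => rw [pv_alt_flatMap]; simp
  | cons b t ih =>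
    rw [List.foldl_cons, pv_step_eq, ih, pv_alt_flatMap, pv_alt_flatMap,
      List.flatMap_cons, List.append_assoc]

-- ===== VERDICT (by name: the statement is the Claim_ definition above) =====
theorem actions_from_blockers_py_spec : Claim_equal_actions_from_blockers_py := by
  intro blockers _
  unfold Spec_actions_from_blockers_py actions_from_blockers_py
  simpa using pv_main blockers []
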